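-- pv_equiv track=rewrite | github.com/ArtificialLegacy/aoc_2024 | day5-1.py | solve
-- ===== SOURCE A (Python) =====
-- import math
--
-- def solve(input: str):
--     content = input.split("\n")
--
--     rules = {}
--     updates = []
--
--     chunk = 0
--     for line in content:
--         if line == "":
--             chunk += 1
--         elif chunk == 0:
--             nums = line.split("|")
--             assert len(nums) == 2
--
--             if nums[0] not in rules:
--                 rules[nums[0]] = [nums[1]]
--             else:
--                 rules[nums[0]].append(nums[1])
--         elif chunk == 1:
--             updates.append(line.split(","))
--
--     sum = 0
--
--     for u in updates:
--         printed = {}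
--         correct = True
--
--         for page in u:
--             printed[page] = True
--
--             if page in rules:
--                 for r in rules[page]:
--                     if r in printed:
--                         correct = False
--                         break
--
--         if correct:
--             sum += int(u[math.floor(len(u) / 2)])
--
--     return sum
-- ===== SOURCE B (Python) =====
-- import math
--
-- def solve(input: str):
--     content = input.split("\n")
--
--     order = set()
--     updates = []
--
--     chunk = 0
--     for line in content:
--         if line == "":
--             chunk += 1
--         elif chunk == 0:
--             nums = line.split("|")
--             assert len(nums) == 2
--             order.add((nums[0], nums[1]))
--         elif chunk == 1:
--             updates.append(line.split(","))
--
--     total = 0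
--     for u in updates:
--         if not any((u[j], u[i]) in order
--                    for j in range(len(u)) for i in range(j + 1)):
--             total += int(u[len(u) // 2])
--     return total
-- ===== Notes on version B (the rewrite author's own statement) =====
-- stated objective: alternative
-- what changed: B stores the rules as a set of (before, after) pairs and judges each update by an all-pairs scan over index pairs i <= j against that set, instead of A's per-page dict of successor lists checked incrementally against a growing dict of already-printed pages.
import Mathlib
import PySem

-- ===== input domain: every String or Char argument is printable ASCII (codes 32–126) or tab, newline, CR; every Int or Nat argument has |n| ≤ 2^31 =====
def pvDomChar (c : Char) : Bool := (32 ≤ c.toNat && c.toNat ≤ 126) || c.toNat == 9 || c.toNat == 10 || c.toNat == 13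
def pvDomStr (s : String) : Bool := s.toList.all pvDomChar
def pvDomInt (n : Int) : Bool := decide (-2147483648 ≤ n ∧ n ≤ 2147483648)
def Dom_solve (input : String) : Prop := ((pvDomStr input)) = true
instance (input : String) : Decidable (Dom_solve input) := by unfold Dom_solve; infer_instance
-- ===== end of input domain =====

-- B replaces A's per-page dict of successor lists + incremental dict of already-printed pages with a set of
-- (before, after) pairs checked by an all-pairs index scan per update; alternative structure, same values.

-- ===== PORT A =====
-- parsing loop state = (chunk, rules, updates); transliteration of A's first for-loop body
def solveParseA (st : Int × PySem.Dict String (List String) × List (List String)) (line : String) :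
    Int × PySem.Dict String (List String) × List (List String) :=
  if line = "" then (st.1 + 1, st.2.1, st.2.2)
  else if st.1 = 0 then
    -- 'assert len(nums) == 2' holds under Pre_solve; nums[0]/nums[1] read with getD
    let nums := (PySem.Str.split? line "|").getD []
    if st.2.1.contains (nums.getD 0 "") = false then       -- 'if nums[0] not in rules'
      (st.1, st.2.1.insert (nums.getD 0 "") [nums.getD 1 ""], st.2.2)
    else                                                   -- 'rules[nums[0]].append(nums[1])'
      (st.1, st.2.1.insert (nums.getD 0 "")
        ((st.2.1.get? (nums.getD 0 "")).getD [] ++ [nums.getD 1 ""]), st.2.2)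
  else if st.1 = 1 then (st.1, st.2.1, st.2.2 ++ [(PySem.Str.split? line ",").getD []])
  else st

-- body of A's 'for page in u' loop; state = (printed, correct); the inner 'for r … break'
-- only sets the flag, so the break-free fold computes the same flag
def solvePageA (rules : PySem.Dict String (List String))
    (st : PySem.Dict String Bool × Bool) (page : String) : PySem.Dict String Bool × Bool :=
  let printed := st.1.insert page true
  match rules.get? page with
  | some rs => (printed, rs.foldl (fun c r => if (printed.get? r).isSome then false else c) st.2)
  | none => (printed, st.2)

def solve (input : String) : Int :=
  let content := (PySem.Str.split? input "\n").getD []   -- sep "\n" ≠ "", so split? is never none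
  let st := content.foldl solveParseA (0, PySem.Dict.empty, [])
  -- math.floor(len(u) / 2) = u.length / 2 for a nonnegative length; int(…) under Pre_solve never fails
  st.2.2.foldl (fun sum u =>
    let res := u.foldl (solvePageA st.2.1) (PySem.Dict.empty, true)
    if res.2 then sum + (PySem.Int.ofStr? (u.getD (u.length / 2) "")).getD 0 else sum) 0

-- ===== PORT B =====
-- parsing loop state = (chunk, order, updates); transliteration of B's first for-loop body
def solveParseB (st : Int × PySem.Set (String × String) × List (List String)) (line : String) :
    Int × PySem.Set (String × String) × List (List String) :=
  if line = "" then (st.1 + 1, st.2.1, st.2.2)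
  else if st.1 = 0 then
    let nums := (PySem.Str.split? line "|").getD []
    (st.1, st.2.1.add (nums.getD 0 "", nums.getD 1 ""), st.2.2)
  else if st.1 = 1 then (st.1, st.2.1, st.2.2 ++ [(PySem.Str.split? line ",").getD []])
  else st

-- B's 'any((u[j], u[i]) in order for j in range(len(u)) for i in range(j + 1))'
def solveBadB (order : PySem.Set (String × String)) (u : List String) : Bool :=
  (List.range u.length).any fun j => (List.range (j + 1)).any fun i =>
    order.contains (u.getD j "", u.getD i "")

def solve_alt (input : String) : Int :=
  let content := (PySem.Str.split? input "\n").getD []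
  let st := content.foldl solveParseB (0, PySem.Set.empty, [])
  st.2.2.foldl (fun total u =>
    if !solveBadB st.2.1 u then total + (PySem.Int.ofStr? (u.getD (u.length / 2) "")).getD 0
    else total) 0

-- ===== PRECONDITION & SPEC =====
-- Pre_solve = exactly the inputs where Python A returns: every rule line (chunk 0) must split on
-- '|' into exactly 2 parts (else A's assert raises AssertionError), and for every update line
-- whose pages are correctly ordered w.r.t. the rule pairs, the middle entry must parse as an int
-- (else A's int() raises ValueError).
def preLines (input : String) : List String := (PySem.Str.split? input "\n").getD []
def preChunk0 (input : String) : List String := (preLines input).takeWhile (· ≠ "")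
def preUpdates (input : String) : List (List String) :=
  ((((preLines input).dropWhile (· ≠ "")).drop 1).takeWhile (· ≠ "")).map
    (fun l => (PySem.Str.split? l ",").getD [])
def preRulePairs (input : String) : List (String × String) :=
  (preChunk0 input).map (fun l =>
    (((PySem.Str.split? l "|").getD []).getD 0 "", ((PySem.Str.split? l "|").getD []).getD 1 ""))
def preOrdered (R : List (String × String)) (u : List String) : Prop :=
  ∀ j < u.length, ∀ i ≤ j, (u.getD j "", u.getD i "") ∉ R

def Pre_solve (input : String) : Prop :=
  (∀ l ∈ preChunk0 input, ((PySem.Str.split? l "|").getD []).length = 2) ∧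
  (∀ u ∈ preUpdates input, preOrdered (preRulePairs input) u →
      (PySem.Int.ofStr? (u.getD (u.length / 2) "")).isSome)
instance (input : String) : Decidable (Pre_solve input) := by
  unfold Pre_solve preOrdered; infer_instance

def pvWitness_solve : String := "1|2\n\n1,3,2"

def Spec_solve (input : String) (out : Int) : Prop := out = solve_alt input
instance (input : String) (out : Int) : Decidable (Spec_solve input out) := by
  unfold Spec_solve; infer_instance

-- ===== CLAIM (what is proved, stated in full; the proofs are below) =====
def Claim_equal_solve : Prop := ∀ (input : String), Dom_solve input → Pre_solve input → Spec_solve input (solve input)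

-- ===== LEMMAS AND PROOFS =====

-- successor list of a page in A's rules dict
def rlist (rules : PySem.Dict String (List String)) (a : String) : List String :=
  (rules.get? a).getD []

-- relation between A's and B's parsing states: same chunk counter, same updates list, and
-- membership in B's pair set = membership in the successor list of A's dict
def ParseRel (sa : Int × PySem.Dict String (List String) × List (List String))
    (sb : Int × PySem.Set (String × String) × List (List String)) : Prop :=
  sa.1 = sb.1 ∧ sa.2.2 = sb.2.2 ∧ ∀ a b, (a, b) ∈ sb.2.1 ↔ b ∈ rlist sa.2.1 a

theorem parseRel_step (sa) (sb) (line : String) (h : ParseRel sa sb) :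
    ParseRel (solveParseA sa line) (solveParseB sb line) := by
  obtain ⟨h1, h2, h3⟩ := h
  unfold solveParseA solveParseB
  rw [h1]
  split_ifs with hl h0 hone
  · exact ⟨by simp, h2, h3⟩
  · -- chunk-0 branch: a rule line (a0, b0) is recorded on both sides
    set nums := (PySem.Str.split? line "|").getD [] with hn
    set a0 := nums.getD 0 "" with ha0
    set b0 := nums.getD 1 "" with hb0
    have key : ∀ (newl : List String),
        (newl = rlist sa.2.1 a0 ++ [b0]) →
        ParseRel (sb.1, sa.2.1.insert a0 newl, sa.2.2)
                 (sb.1, sb.2.1.add (a0, b0), sb.2.2) := by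
      intro newl hnew
      refine ⟨rfl, h2, ?_⟩
      intro a b
      rw [PySem.Set.mem_add, h3 a b]
      simp only [rlist]
      by_cases hae : a = a0
      · subst hae
        simp only [PySem.Dict.get?_insert_self, Option.getD_some, hnew]
        simp [rlist, List.mem_append, Prod.ext_iff]
      · rw [PySem.Dict.get?_insert_of_ne _ _ hae]
        have hne : (a, b) ≠ (a0, b0) := fun hc => hae (congrArg Prod.fst hc)
        simp [hne]
    dsimp only
    split_ifs with hc
    · have hg : sa.2.1.get? a0 = none := by
        have := PySem.Dict.contains_eq_isSome_get? sa.2.1 a0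
        rw [hc] at this
        exact Option.not_isSome_iff_eq_none.mp (by simp [← this])
      exact key [b0] (by simp [rlist, hg])
    · exact key _ (by simp [rlist, ha0, hb0, List.getD])
  · exact ⟨rfl, by rw [h2], h3⟩
  · exact ⟨h1, h2, h3⟩

theorem parseRel_foldl (content : List String) (sa) (sb) (h : ParseRel sa sb) :
    ParseRel (content.foldl solveParseA sa) (content.foldl solveParseB sb) := by
  induction content generalizing sa sb with
  | nil => exact h
  | cons l rest ih => exact ih _ _ (parseRel_step _ _ _ h)

-- the violation property both per-update checks decide: some page u[j] has a recorded successor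
-- among the pages printed up to and including position j (prepended with 'seen' for the induction)
def Viol (rules : PySem.Dict String (List String)) (seen u : List String) : Prop :=
  ∃ j < u.length, ∃ r ∈ rlist rules (u.getD j ""), r ∈ seen ++ u.take (j + 1)

-- structural form of the violation check, accumulating the pages already seen
def badSpec (rules : PySem.Dict String (List String)) (seen : List String) :
    List String → Bool
  | [] => false
  | p :: rest =>
      (rlist rules p).any (fun r => decide (r ∈ seen ++ [p])) || badSpec rules (seen ++ [p]) rest

-- A's per-update loop computes the badSpec flag
theorem foldA_correct (rules) (u : List String) : ∀ (d : PySem.Dict String Bool) (c : Bool)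
    (seen : List String), (∀ x, (d.get? x).isSome = decide (x ∈ seen)) →
    (u.foldl (solvePageA rules) (d, c)).2 = (c && !badSpec rules seen u) := by
  induction u with
  | nil => intro d c seen _; simp [badSpec]
  | cons p rest ih =>
    intro d c seen hd
    have hmem : ∀ x, ((d.insert p true).get? x).isSome = decide (x ∈ seen ++ [p]) := by
      intro x
      by_cases hx : x = p
      · subst hx; simp [PySem.Dict.get?_insert_self]
      · rw [PySem.Dict.get?_insert_of_ne _ _ hx, hd]
        simp [hx]
    have hstep : solvePageA rules (d, c) p =
        (d.insert p true, c && !(rlist rules p).any (fun r => decide (r ∈ seen ++ [p]))) := by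
      unfold solvePageA
      cases hg : rules.get? p with
      | none => simp [rlist, hg]
      | some rs =>
        simp only [rlist, hg, Option.getD_some]
        congr 1
        have h1 := PySem.List.foldl_if_false_eq (fun r => ((d.insert p true).get? r).isSome) rs c
        rw [h1]
        congr 1
        simp only [hmem]
    rw [List.foldl_cons, hstep, ih _ _ (seen ++ [p]) hmem]
    simp [badSpec, Bool.and_assoc]

theorem badSpec_iff (rules) (u : List String) : ∀ seen,
    (badSpec rules seen u = true ↔ Viol rules seen u) := by
  induction u with
  | nil => intro seen; simp [badSpec, Viol]
  | cons p rest ih =>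
    intro seen
    rw [badSpec, Bool.or_eq_true, ih (seen ++ [p])]
    constructor
    · rintro (h | h)
      · rw [List.any_eq_true] at h
        obtain ⟨r, hr, hin⟩ := h
        exact ⟨0, by simp, r, by simpa using hr, by simpa using of_decide_eq_true hin⟩
      · obtain ⟨j, hj, r, hr, hin⟩ := h
        refine ⟨j + 1, by simpa using hj, r, by simpa using hr, ?_⟩
        simpa [List.take_succ_cons, List.append_assoc] using hin
    · rintro ⟨j, hj, r, hr, hin⟩
      cases j with
      | zero =>
        left
        rw [List.any_eq_true]
        exact ⟨r, by simpa using hr, decide_eq_true (by simpa using hin)⟩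
      | succ k =>
        right
        refine ⟨k, by simpa using hj, r, by simpa using hr, ?_⟩
        simpa [List.take_succ_cons, List.append_assoc] using hin

-- B's all-pairs scan decides the same property
theorem badB_iff (rules) (order : PySem.Set (String × String))
    (hmem : ∀ a b, (a, b) ∈ order ↔ b ∈ rlist rules a) (u : List String) :
    (solveBadB order u = true ↔ Viol rules [] u) := by
  unfold solveBadB Viol
  simp only [List.any_eq_true, List.mem_range, PySem.Set.contains_iff, List.nil_append]
  constructor
  · rintro ⟨j, hj, i, hi, hin⟩
    rw [hmem] at hin
    refine ⟨j, hj, u.getD i "", hin, ?_⟩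
    have hilen : i < u.length := lt_of_lt_of_le hi (by omega)
    rw [List.getD_eq_getElem _ _ hilen]
    exact List.mem_take_iff_getElem.mpr ⟨i, by omega, rfl⟩
  · rintro ⟨j, hj, r, hr, hin⟩
    obtain ⟨i, hi, heq⟩ := List.mem_take_iff_getElem.mp hin
    refine ⟨j, hj, i, by omega, ?_⟩
    rw [hmem]
    have hilen : i < u.length := by omega
    rw [List.getD_eq_getElem _ _ hilen, heq]
    exact hr

-- ===== VERDICT (by name: the statement is the Claim_ definition above) =====
theorem solve_spec : Claim_equal_solve := by
  intro input _ _
  unfold Spec_solve solve solve_alt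
  obtain ⟨hch, hupd, hm⟩ :=
    parseRel_foldl ((PySem.Str.split? input "\n").getD [])
      (0, PySem.Dict.empty, []) (0, PySem.Set.empty, [])
      ⟨rfl, rfl, by simp [rlist, PySem.Set.empty, PySem.Dict.get?_empty]⟩
  dsimp only
  rw [hupd]
  congr 1
  funext s u
  have h1 : (u.foldl
      (solvePageA ((((PySem.Str.split? input "\n").getD []).foldl solveParseA
        (0, PySem.Dict.empty, [])).2.1)) (PySem.Dict.empty, true)).2
      = !badSpec ((((PySem.Str.split? input "\n").getD []).foldl solveParseA
        (0, PySem.Dict.empty, [])).2.1) [] u := by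
    rw [foldA_correct _ _ _ _ [] (by simp [PySem.Dict.get?_empty])]
    simp
  have h2 : solveBadB ((((PySem.Str.split? input "\n").getD []).foldl solveParseB
      (0, PySem.Set.empty, [])).2.1) u
      = badSpec ((((PySem.Str.split? input "\n").getD []).foldl solveParseA
        (0, PySem.Dict.empty, [])).2.1) [] u := by
    rw [Bool.eq_iff_iff, badB_iff _ _ hm, badSpec_iff]
  rw [h1, h2]
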